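-- pv_equiv track=rewrite | github.com/kylefoley76/german_language_analyzer | general/very_general_functions.py | divide_range_w_min
-- ===== SOURCE A (Python) =====
-- def divide_range_w_min(total: int, targ:int, mini: int):
--     '''
--     suppose you want to divide a quantity such that each
--     quantity is close to the target 300.  but you don't want the
--     remainder to be below a certain amount.  that is what
--     the mini specifies
--     '''
--
--
--     while 1:
--         c = total % targ
--         if c < mini:
--             targ += 1
--         else:
--             break
--
--     lst = []
--     d = 0
--     while 1:
--         d += targ
--         if d > total:
--             break
--         lst.append(d)
--
--     return lst
-- ===== SOURCE B (Python) =====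
-- def divide_range_w_min(total: int, targ: int, mini: int):
--     # Instead of incrementing the target one by one (O(total) probes), jump over
--     # whole blocks of candidate targets that share the same quotient q = total // t:
--     # within such a block the remainder total - q*t is strictly decreasing, so if the
--     # block's first candidate fails, the whole block fails and we can jump to
--     # total // q + 1, the first t with a smaller quotient.
--     t = targ
--     if mini > 0 and targ <= total:
--         while True:
--             q = total // t
--             if q == 0 or total - q * t >= mini:
--                 break
--             t = total // q + 1
--     return [t * i for i in range(1, total // t + 1)]
-- ===== Notes on version B (the rewrite author's own statement) =====
-- stated objective: alternative
-- what changed: B replaces A's one-by-one increment of the target with jumps over whole constant-quotient blocks (within a block the remainder is decreasing, so a failing block is skipped to total//q+1), and emits the multiples with a single range comprehension instead of an accumulating loop.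
-- outside the precondition, e.g. on divide_range_w_min(-10, -3, -5): A returns [], B returns [-3, -6, -9]
import Mathlib
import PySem

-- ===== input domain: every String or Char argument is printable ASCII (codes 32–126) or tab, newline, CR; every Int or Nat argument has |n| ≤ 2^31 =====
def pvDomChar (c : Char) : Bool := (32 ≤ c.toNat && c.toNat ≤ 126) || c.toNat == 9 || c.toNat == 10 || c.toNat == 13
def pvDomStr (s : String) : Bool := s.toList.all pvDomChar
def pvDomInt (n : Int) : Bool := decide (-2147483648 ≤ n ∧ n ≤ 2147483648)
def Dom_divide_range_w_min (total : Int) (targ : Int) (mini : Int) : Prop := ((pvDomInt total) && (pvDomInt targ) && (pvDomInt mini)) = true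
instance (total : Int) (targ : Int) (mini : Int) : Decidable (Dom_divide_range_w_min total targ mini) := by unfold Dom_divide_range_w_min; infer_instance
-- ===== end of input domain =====

-- ===== PORT A =====
-- B jumps over constant-quotient blocks of candidate targets instead of A's unit steps, and emits the multiples as a range comprehension.
-- A's two while-loops are unbounded; they are ported with a fuel argument that provably suffices on every input of Pre_.
def pvA_loop1 (total : Int) (mini : Int) : Nat → Int → Int
  | 0, targ => targ
  | n+1, targ =>
      if PySem.Int.mod total targ < mini then pvA_loop1 total mini n (targ + 1) else targ

def pvA_loop2 (total : Int) (targ : Int) : Nat → Int → List Int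
  | 0, _ => []
  | n+1, d =>
      let d' := d + targ
      if d' > total then [] else d' :: pvA_loop2 total targ n d'

def divide_range_w_min (total : Int) (targ : Int) (mini : Int) : List Int :=
  let fuel := total.natAbs + targ.natAbs + mini.natAbs + 2
  let t := pvA_loop1 total mini fuel targ
  pvA_loop2 total t fuel 0

-- ===== PORT B =====
-- fueled port of Source B's block-jump loop; the quotient total//t strictly decreases each step, so natAbs total + 2 fuel suffices
def pvB_loop (total : Int) (mini : Int) : Nat → Int → Int
  | 0, t => t
  | n+1, t =>
      let q := PySem.Int.floordiv total t
      if q = 0 ∨ total - q * t ≥ mini then t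
      else pvB_loop total mini n (PySem.Int.floordiv total q + 1)

def divide_range_w_min_alt (total : Int) (targ : Int) (mini : Int) : List Int :=
  let t := if mini > 0 ∧ targ ≤ total then pvB_loop total mini (total.natAbs + 2) targ else targ
  (PySem.List.pyRange 1 (PySem.Int.floordiv total t + 1) 1).map (fun i => t * i)

-- ===== PRECONDITION & SPEC =====
-- Pre_ excludes (a) targ ≤ 0, where A divides by zero, loops forever, or accidentally returns [] for a negative
-- target, and (b) 0 ≤ total < mini with 0 < mini, where A's first loop never terminates.
def Pre_divide_range_w_min (total : Int) (targ : Int) (mini : Int) : Prop :=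
  1 ≤ targ ∧ (mini ≤ 0 ∨ total < 0 ∨ mini ≤ total)
instance (total : Int) (targ : Int) (mini : Int) : Decidable (Pre_divide_range_w_min total targ mini) := by unfold Pre_divide_range_w_min; infer_instance
def pvWitness_divide_range_w_min : Int × Int × Int := (10, 3, 2)

def Spec_divide_range_w_min (total : Int) (targ : Int) (mini : Int) (out : List Int) : Prop := out = divide_range_w_min_alt total targ mini
instance (total : Int) (targ : Int) (mini : Int) (out : List Int) : Decidable (Spec_divide_range_w_min total targ mini out) := by unfold Spec_divide_range_w_min; infer_instance

-- ===== CLAIM (what is proved, stated in full; the proofs are below) =====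
def Claim_equal_divide_range_w_min : Prop := ∀ (total : Int) (targ : Int) (mini : Int), Dom_divide_range_w_min total targ mini → Pre_divide_range_w_min total targ mini → Spec_divide_range_w_min total targ mini (divide_range_w_min total targ mini)

-- ===== LEMMAS AND PROOFS =====
-- "t is an admissible target": the Python condition total % t >= mini
def pvP (total : Int) (mini : Int) (t : Int) : Prop := mini ≤ PySem.Int.mod total t

-- "r is the least admissible target ≥ targ"
def pvLeast (total : Int) (mini : Int) (targ : Int) (r : Int) : Prop :=
  pvP total mini r ∧ targ ≤ r ∧ ∀ s, targ ≤ s → s < r → ¬ pvP total mini s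

theorem pvLeast_unique (total mini targ r1 r2 : Int)
    (h1 : pvLeast total mini targ r1) (h2 : pvLeast total mini targ r2) : r1 = r2 := by
  obtain ⟨hp1, hl1, hm1⟩ := h1
  obtain ⟨hp2, hl2, hm2⟩ := h2
  by_contra hne
  rcases lt_or_gt_of_ne hne with h | h
  · exact hm2 r1 hl1 h hp1
  · exact hm1 r2 hl2 h hp2

theorem pvA_loop1_least (total mini : Int) :
    ∀ (fuel : Nat) (targ w : Int), targ ≤ w → w < targ + fuel → pvP total mini w →
      pvLeast total mini targ (pvA_loop1 total mini fuel targ) := by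
  intro fuel
  induction fuel with
  | zero => intro targ w h1 h2 _; omega
  | succ n ih =>
      intro targ w h1 h2 hw
      by_cases h : PySem.Int.mod total targ < mini
      · have hwt : targ + 1 ≤ w := by
          rcases eq_or_lt_of_le h1 with rfl | hlt
          · exact absurd hw (by simpa [pvP] using h)
          · omega
        obtain ⟨hp, hl, hm⟩ := ih (targ + 1) w hwt (by omega) hw
        refine ⟨by simpa [pvA_loop1, h] using hp, by simp only [pvA_loop1, if_pos h]; omega, ?_⟩
        intro s hs1 hs2
        simp only [pvA_loop1, if_pos h] at hs2 ⊢
        rcases eq_or_lt_of_le hs1 with rfl | hlt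
        · simpa [pvP] using h
        · exact hm s (by omega) hs2
      · exact ⟨by simpa [pvA_loop1, h, pvP] using not_lt.mp h, by simp [pvA_loop1, h],
          by simp only [pvA_loop1, if_neg h]; omega⟩

theorem pv_floordiv_toNat_le (total t : Int) (ht : 1 ≤ t) :
    (PySem.Int.floordiv total t).toNat ≤ total.natAbs := by
  rw [PySem.Int.floordiv_eq_ediv_of_pos (by omega)]
  rcases le_or_gt 0 total with h | h
  · have := Int.ediv_le_self (b := t) h
    omega
  · have : total / t < 0 := Int.ediv_neg_of_neg_of_pos h (by omega)
    omega

theorem pv_floordiv_nonpos (total t : Int) (ht : 1 ≤ t) (hlt : total < t) :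
    PySem.Int.floordiv total t ≤ 0 := by
  rw [PySem.Int.floordiv_eq_ediv_of_pos (by omega)]
  rcases le_or_gt 0 total with h | h
  · have := Int.ediv_eq_zero_of_lt h hlt
    omega
  · have : total / t < 0 := Int.ediv_neg_of_neg_of_pos h (by omega)
    omega

theorem pvB_loop_least (total mini targ : Int) (htarg : 1 ≤ targ) (hm : 0 < mini) (hmt : mini ≤ total) :
    ∀ (fuel : Nat) (t : Int), 1 ≤ t → targ ≤ t →
      (∀ s, targ ≤ s → s < t → ¬ pvP total mini s) →
      (PySem.Int.floordiv total t).toNat < fuel →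
      pvLeast total mini targ (pvB_loop total mini fuel t) := by
  intro fuel
  induction fuel with
  | zero => intro t _ _ _ hf; omega
  | succ n ih =>
      intro t ht htt hfail hf
      have ht0 : 0 < t := by omega
      have hdd : PySem.Int.floordiv total t = total / t := PySem.Int.floordiv_eq_ediv_of_pos ht0
      by_cases hbrk : PySem.Int.floordiv total t = 0 ∨ total - PySem.Int.floordiv total t * t ≥ mini
      · have hstep : pvB_loop total mini (n+1) t = t := by
          simp only [pvB_loop]; rw [if_pos hbrk]
        rw [hstep]
        refine ⟨?_, htt, hfail⟩
        have hmodd : PySem.Int.mod total t = total - t * (total / t) := by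
          rw [PySem.Int.mod_eq_emod_of_pos ht0, Int.emod_def]
        rcases hbrk with h0 | hge
        · rw [hdd] at h0
          rw [pvP, hmodd, h0]; simpa using hmt
        · rw [hdd] at hge
          rw [pvP, hmodd]
          have : total / t * t = t * (total / t) := mul_comm _ _
          linarith
      · have hstep : pvB_loop total mini (n+1) t =
            pvB_loop total mini n (PySem.Int.floordiv total (PySem.Int.floordiv total t) + 1) := by
          simp only [pvB_loop]; rw [if_neg hbrk]
        push_neg at hbrk
        obtain ⟨hq0, hlt⟩ := hbrk
        rw [hdd] at hq0 hlt hstep hf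
        set q := total / t with hq
        have hqnn : 0 ≤ q := Int.ediv_nonneg (by omega) (by omega)
        have hq1 : 1 ≤ q := by omega
        have hd2 : PySem.Int.floordiv total q = total / q := PySem.Int.floordiv_eq_ediv_of_pos (by omega)
        rw [hd2] at hstep
        have hqt : q * t ≤ total := by
          have h1 := Int.emod_nonneg total (show t ≠ 0 by omega)
          rw [Int.emod_def, ← hq] at h1
          linarith [mul_comm t q]
        have hqt2 : total < (q + 1) * t := by
          have h1 := Int.emod_lt_of_pos total ht0
          rw [Int.emod_def, ← hq] at h1
          have h2 : (q + 1) * t = q * t + t := by ring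
          linarith [mul_comm t q]
        have htle : t ≤ total / q := (Int.le_ediv_iff_mul_le (by omega)).mpr (by linarith [mul_comm t q])
        have hqq : q * (total / q) ≤ total := by
          have := Int.ediv_mul_le total (show q ≠ 0 by omega)
          linarith [mul_comm (total / q) q]
        have hqr : total < q * (total / q) + q := by
          have h1 := Int.emod_lt_of_pos total (show (0:Int) < q by omega)
          rw [Int.emod_def] at h1
          linarith
        set t' := total / q + 1 with ht'
        have hblock : ∀ s, t ≤ s → s < t' → total / s = q := by
          intro s hs1 hs2
          have hs0 : 0 < s := by omega
          have hge : q ≤ total / s := (Int.le_ediv_iff_mul_le hs0).mpr (by nlinarith)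
          have hle : total / s ≤ q := by
            by_contra hc
            push_neg at hc
            have h1 : (q + 1) * s ≤ total := (Int.le_ediv_iff_mul_le hs0).mp (by omega)
            nlinarith
          omega
        have hfail' : ∀ s, targ ≤ s → s < t' → ¬ pvP total mini s := by
          intro s hs1 hs2 hp
          rcases lt_or_ge s t with h | h
          · exact hfail s hs1 h hp
          · have hs0 : 0 < s := by omega
            have hqs := hblock s h hs2
            have hmods : PySem.Int.mod total s = total - q * s := by
              rw [PySem.Int.mod_eq_emod_of_pos hs0, Int.emod_def, hqs]; ring
            rw [pvP, hmods] at hp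
            nlinarith
        have hfuel' : (PySem.Int.floordiv total t').toNat < n := by
          have ht'0 : 0 < t' := by omega
          rw [PySem.Int.floordiv_eq_ediv_of_pos ht'0]
          have hlt' : total / t' < q := by
            by_contra hc
            push_neg at hc
            have h1 : q * t' ≤ total := (Int.le_ediv_iff_mul_le ht'0).mp hc
            have h2 : q * t' = q * (total / q) + q := by rw [ht']; ring
            linarith
          have hnn : 0 ≤ total / t' := Int.ediv_nonneg (by omega) (by omega)
          omega
        rw [hstep]
        exact ih t' (by omega) (by omega) hfail' hfuel'

theorem pv_phase2 (total t : Int) (ht : 1 ≤ t) :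
    ∀ (fuel : Nat) (j : Int), 0 ≤ j → (PySem.Int.floordiv total t - j).toNat < fuel →
      pvA_loop2 total t fuel (j * t) =
        (PySem.List.pyRange (j + 1) (PySem.Int.floordiv total t + 1) 1).map (fun i => t * i) := by
  have hdd : PySem.Int.floordiv total t = total / t := PySem.Int.floordiv_eq_ediv_of_pos (by omega)
  intro fuel
  induction fuel with
  | zero => intro j _ hf; omega
  | succ n ih =>
      intro j hj hf
      by_cases h : j * t + t > total
      · have hk : total / t < j + 1 := by
          rw [Int.ediv_lt_iff_lt_mul (by omega)]; nlinarith
        rw [hdd, PySem.List.pyRange_one_eq_nil (by omega)]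
        simp [pvA_loop2, h]
      · push_neg at h
        have hk : j + 1 ≤ total / t := by
          rw [Int.le_ediv_iff_mul_le (by omega)]; nlinarith
        rw [hdd, PySem.List.pyRange_one_cons (by omega), List.map_cons]
        have hrec := ih (j + 1) (by omega) (by rw [hdd] at hf ⊢; omega)
        simp only [pvA_loop2, if_neg (show ¬ (j * t + t > total) by omega)]
        rw [show j * t + t = (j + 1) * t by ring, hrec, hdd]
        congr 1
        ring

-- A's fuel is large enough to find the least admissible target under Pre_
theorem pvA_least (total targ mini : Int) (htarg : 1 ≤ targ)
    (hpre : mini ≤ 0 ∨ total < 0 ∨ mini ≤ total) :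
    pvLeast total mini targ
      (pvA_loop1 total mini (total.natAbs + targ.natAbs + mini.natAbs + 2) targ) := by
  by_cases hmp : mini ≤ 0
  · refine pvA_loop1_least total mini _ targ targ le_rfl (by omega) ?_
    have := PySem.Int.mod_nonneg total (show 0 < targ by omega)
    simp only [pvP]; omega
  · push_neg at hmp
    by_cases htot : 0 ≤ total
    · -- 0 < mini, 0 ≤ total: Pre_ forces mini ≤ total; w = max targ (total + 1) is admissible
      have hmt : mini ≤ total := by rcases hpre with h | h | h <;> omega
      set w := max targ (total + 1) with hw
      have hw1 : targ ≤ w := le_max_left _ _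
      have hw2 : total + 1 ≤ w := le_max_right _ _
      refine pvA_loop1_least total mini _ targ w hw1 (by omega) ?_
      have hmod : PySem.Int.mod total w = total := by
        rw [PySem.Int.mod_eq_emod_of_pos (by omega)]
        exact Int.emod_eq_of_lt (by omega) (by omega)
      rw [pvP, hmod]; omega
    · -- 0 < mini, total < 0: w = max targ (mini - total) is admissible
      push_neg at htot
      set w := max targ (mini - total) with hw
      have hw1 : targ ≤ w := le_max_left _ _
      have hw2 : mini - total ≤ w := le_max_right _ _
      have hw0 : 0 < w := by omega
      refine pvA_loop1_least total mini _ targ w hw1 (by omega) ?_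
      have hmod : PySem.Int.mod total w = total + w := by
        rw [PySem.Int.mod_eq_emod_of_pos hw0]
        have h1 : (total + w) % w = total + w := Int.emod_eq_of_lt (by omega) (by omega)
        have h2 : (total + w - w) % w = (total + w) % w := Int.sub_emod_right _ _
        simpa using h2.trans h1
      rw [pvP, hmod]; omega

-- ===== VERDICT (by name: the statement is the Claim_ definition above) =====
theorem divide_range_w_min_spec : Claim_equal_divide_range_w_min := by
  intro total targ mini _hdom hpre
  obtain ⟨htarg, hrest⟩ := hpre
  simp only [Spec_divide_range_w_min, divide_range_w_min, divide_range_w_min_alt]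
  set F := total.natAbs + targ.natAbs + mini.natAbs + 2 with hF
  have hA := pvA_least total targ mini htarg hrest
  set rA := pvA_loop1 total mini F targ with hrA
  have hrA1 : 1 ≤ rA := by have := hA.2.1; omega
  have hphase := pv_phase2 total rA hrA1 F 0 le_rfl
    (by have := pv_floordiv_toNat_le total rA hrA1; omega)
  simp only [zero_mul, zero_add] at hphase
  rw [hphase]
  by_cases hc : mini > 0 ∧ targ ≤ total
  · rw [if_pos hc]
    have hmt : mini ≤ total := by rcases hrest with h | h | h <;> omega
    have hB := pvB_loop_least total mini targ htarg hc.1 hmt (total.natAbs + 2) targ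
      (by omega) le_rfl (by intro s h1 h2; omega)
      (by have := pv_floordiv_toNat_le total targ (by omega); omega)
    rw [pvLeast_unique total mini targ rA (pvB_loop total mini (total.natAbs + 2) targ) hA hB]
  · rw [if_neg hc]
    rcases not_and_or.mp hc with hm | ht
    · push_neg at hm
      have hrAeq : rA = targ := by
        refine pvLeast_unique total mini targ rA targ hA ⟨?_, le_rfl, by intro s h1 h2; omega⟩
        have := PySem.Int.mod_nonneg total (show 0 < targ by omega)
        simp only [pvP]; omega
      rw [hrAeq]
    · push_neg at ht
      have hge : targ ≤ rA := hA.2.1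
      have h1 := pv_floordiv_nonpos total rA hrA1 (lt_of_lt_of_le ht hge)
      have h2 := pv_floordiv_nonpos total targ (by omega) ht
      rw [PySem.List.pyRange_one_eq_nil (by omega), PySem.List.pyRange_one_eq_nil (by omega)]
      simp
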